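-- pv_equiv track=rewrite | github.com/lommick1/burning_coins | burning_coins.py | coins_rec
-- ===== SOURCE A (Python) =====
-- def coins_rec(i, j, v):
--     if (i > j):
--         return 0
--
--     # cas où il ne reste que la ième pièce => le choix est vite fait
--     # arrive quand il y a un nombre pair de pièce
--     if (i == j):
--         return v[i]
--
--     # cas où il ne reste que 2 pièces => on prend la plus elevée
--     # arrive quand il y a un nombre impair de pièce
--     if (i == j-1):
--         return max(v[i], v[j])
--
--     # cas général, 4 possibilités :
--     #   - si on prend la pièce à l'extremité gauche (ième):
--     #       - l'adversaire prend ensuite celle à gauche ((i+1)ème)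
--     #       - l'adversaire prend ensuite celle à droite (jème)
--     #   - si on prend la pièce à l'extremité droite (jème):
--     #       - l'adversaire prend ensuite celle à gauche (ième)
--     #       - l'adversaire prend ensuite celle à droite ((j-1)ème)
--     #
--     return max(
--         min(
--             v[i] + coins_rec(i+2, j, v),
--             v[i] + coins_rec(i+1, j-1, v)
--         ),
--         min(
--             v[j] + coins_rec(i, j-2, v),
--             v[j] + coins_rec(i+1, j-1, v)
--         )
--     )
-- ===== SOURCE B (Python) =====
-- def coins_rec(i, j, v):
--     # Bottom-up interval DP over segment lengths with a rolling 1D array.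
--     if i > j:
--         return 0
--     w = [v[k] for k in range(i, j + 1)]
--     n = len(w)
--     if n % 2 == 1:
--         L = 1
--         cur = w[:]
--     else:
--         L = 0
--         cur = [0] * (n + 1)
--     while L < n:
--         L += 2
--         cur = [max(w[a] + min(cur[a + 2], cur[a + 1]),
--                    w[a + L - 1] + min(cur[a], cur[a + 1]))
--                for a in range(n - L + 1)]
--     return cur[0]
-- ===== Notes on version B (the rewrite author's own statement) =====
-- stated objective: alternative
-- what changed: Replaced the top-down recursion over (i,j) with a bottom-up interval DP that iterates over segment lengths of the same parity, keeping a single rolling 1D array (each length-L value depends only on length-(L-2) values).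
import Mathlib
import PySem

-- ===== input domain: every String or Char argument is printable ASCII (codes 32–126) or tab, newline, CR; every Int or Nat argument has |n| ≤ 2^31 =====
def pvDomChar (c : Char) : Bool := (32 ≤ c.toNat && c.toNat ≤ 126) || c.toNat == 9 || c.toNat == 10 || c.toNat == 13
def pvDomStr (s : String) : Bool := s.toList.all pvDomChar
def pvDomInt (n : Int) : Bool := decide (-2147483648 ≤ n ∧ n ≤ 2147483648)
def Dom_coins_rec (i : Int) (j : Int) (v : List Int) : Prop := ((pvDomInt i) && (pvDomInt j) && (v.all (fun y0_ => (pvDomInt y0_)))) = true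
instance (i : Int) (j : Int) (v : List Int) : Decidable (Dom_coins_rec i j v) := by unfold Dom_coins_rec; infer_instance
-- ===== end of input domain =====

-- ===== PORT A =====
-- B replaces A's top-down recursion by a bottom-up interval DP with a rolling 1D array (alternative algorithm).
def coins_rec (i : Int) (j : Int) (v : List Int) : Int :=
  if _h1 : i > j then 0
  else if _h2 : i = j then PySem.List.pyGetD v i 0
  else if _h3 : i = j - 1 then max (PySem.List.pyGetD v i 0) (PySem.List.pyGetD v j 0)
  else
    max
      (min (PySem.List.pyGetD v i 0 + coins_rec (i+2) j v)
           (PySem.List.pyGetD v i 0 + coins_rec (i+1) (j-1) v))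
      (min (PySem.List.pyGetD v j 0 + coins_rec i (j-2) v)
           (PySem.List.pyGetD v j 0 + coins_rec (i+1) (j-1) v))
termination_by (j - i).toNat
decreasing_by all_goals omega

-- ===== PORT B =====
-- one pass of Source B's while-loop body: the row for segment length L from the row for length L-2
def altStep (w cur : List Int) (L : Int) : List Int :=
  (PySem.List.pyRange 0 ((w.length : Int) - L + 1) 1).map (fun a =>
    max (PySem.List.pyGetD w a 0 + min (PySem.List.pyGetD cur (a+2) 0) (PySem.List.pyGetD cur (a+1) 0))
        (PySem.List.pyGetD w (a+L-1) 0 + min (PySem.List.pyGetD cur a 0) (PySem.List.pyGetD cur (a+1) 0)))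

-- Source B's while loop; t is its (exact) number of iterations, (n - L) / 2
def altLoop (t : Nat) (L : Int) (w cur : List Int) : List Int :=
  match t with
  | 0 => cur
  | Nat.succ t' => altLoop t' (L + 2) w (altStep w cur (L + 2))

-- the parity split on n = len(w), the loop, and the final cur[0]
def altRun (w : List Int) : Int :=
  if w.length % 2 = 1 then PySem.List.pyGetD (altLoop ((w.length - 1) / 2) 1 w w) 0 0
  else PySem.List.pyGetD (altLoop (w.length / 2) 0 w (List.replicate (w.length + 1) 0)) 0 0

def coins_rec_alt (i : Int) (j : Int) (v : List Int) : Int :=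
  if i > j then 0
  else altRun ((PySem.List.pyRange i (j+1) 1).map (fun k => PySem.List.pyGetD v k 0))

-- ===== PRECONDITION & SPEC =====
-- Pre_ excludes exactly the inputs where Python A raises IndexError (i <= j with some index of
-- [i, j] outside [-len(v), len(v))); Python B raises IndexError on exactly the same inputs.
def Pre_coins_rec (i : Int) (j : Int) (v : List Int) : Prop :=
  i > j ∨ (-(v.length : Int) ≤ i ∧ i ≤ j ∧ j < (v.length : Int))
instance (i : Int) (j : Int) (v : List Int) : Decidable (Pre_coins_rec i j v) := by
  unfold Pre_coins_rec; infer_instance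

def pvWitness_coins_rec : Int × Int × List Int := (0, 3, [4, 7, 2, 9])

def Spec_coins_rec (i : Int) (j : Int) (v : List Int) (out : Int) : Prop := out = coins_rec_alt i j v
instance (i : Int) (j : Int) (v : List Int) (out : Int) : Decidable (Spec_coins_rec i j v out) := by
  unfold Spec_coins_rec; infer_instance

-- ===== CLAIM (what is proved, stated in full; the proofs are below) =====
def Claim_equal_coins_rec : Prop := ∀ (i : Int) (j : Int) (v : List Int), Dom_coins_rec i j v → Pre_coins_rec i j v → Spec_coins_rec i j v (coins_rec i j v)

-- ===== LEMMAS AND PROOFS =====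

theorem coins_rec_of_gt {i j : Int} (v : List Int) (h : i > j) : coins_rec i j v = 0 := by
  rw [coins_rec]; simp [h]

theorem coins_rec_self (x : Int) (v : List Int) : coins_rec x x v = PySem.List.pyGetD v x 0 := by
  rw [coins_rec]; simp

-- A satisfies one uniform recurrence for every i ≤ j (its two base cases are instances of it)
theorem coins_rec_recur {i j : Int} (v : List Int) (h : i ≤ j) :
    coins_rec i j v =
      max
        (min (PySem.List.pyGetD v i 0 + coins_rec (i+2) j v)
             (PySem.List.pyGetD v i 0 + coins_rec (i+1) (j-1) v))
        (min (PySem.List.pyGetD v j 0 + coins_rec i (j-2) v)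
             (PySem.List.pyGetD v j 0 + coins_rec (i+1) (j-1) v)) := by
  by_cases h2 : i = j
  · subst h2
    rw [coins_rec]
    simp [coins_rec_of_gt _ (by omega : i + 2 > i),
          coins_rec_of_gt _ (by omega : i + 1 > i - 1),
          coins_rec_of_gt _ (by omega : i > i - 2)]
  · by_cases h3 : i = j - 1
    · obtain rfl : j = i + 1 := by omega
      rw [coins_rec]
      simp [(by omega : ¬ i = i + 1),
            coins_rec_of_gt _ (by omega : i + 2 > i + 1),
            coins_rec_of_gt _ (by omega : i > i + 1 - 2),
            coins_rec_of_gt (i := i + 1) (j := i) _ (by omega)]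
    · rw [coins_rec, dif_neg (show ¬ i > j by omega), dif_neg h2, dif_neg h3]

theorem pyGetD_replicate_zero (m : Nat) (a : Int) :
    PySem.List.pyGetD (List.replicate m (0:Int)) a 0 = 0 := by
  simp only [PySem.List.pyGetD, PySem.List.pyGet?, PySem.List.pyIdx?]
  split_ifs <;> simp [List.getElem?_replicate] <;> split_ifs <;> simp

-- loop invariant: if cur[a] is A's value on the length-L segment starting at i+a, running the
-- remaining t iterations (L + 2t = n) yields cur[0] = A's value on the whole window [i, i+n-1]
theorem altLoop_eval (v w : List Int) (i : Int)
    (hw : ∀ a : Int, 0 ≤ a → a < (w.length : Int) →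
      PySem.List.pyGetD w a 0 = PySem.List.pyGetD v (i + a) 0) :
    ∀ (t : Nat) (L : Int) (cur : List Int), 0 ≤ L → L + 2 * t = (w.length : Int) →
    (cur.length : Int) = (w.length : Int) - L + 1 →
    (∀ a : Int, 0 ≤ a → a < (cur.length : Int) →
      PySem.List.pyGetD cur a 0 = coins_rec (i + a) (i + a + L - 1) v) →
    PySem.List.pyGetD (altLoop t L w cur) 0 0 = coins_rec i (i + (w.length : Int) - 1) v := by
  intro t
  induction t with
  | zero =>
    intro L cur _ hsum hlen hcur
    have hl : L = (w.length : Int) := by omega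
    subst hl
    have h0 := hcur 0 (by omega) (by omega)
    simpa [altLoop] using h0
  | succ t ih =>
    intro L cur hL0 hsum hlen hcur
    have hL2 : L + 2 ≤ (w.length : Int) := by omega
    have hlen' : ((altStep w cur (L + 2)).length : Int) = (w.length : Int) - (L + 2) + 1 := by
      simp [altStep, PySem.List.length_pyRange_one]
      omega
    simp only [altLoop]
    apply ih (L + 2) (altStep w cur (L + 2)) (by omega) (by omega) hlen'
    intro a ha0 halt
    rw [hlen'] at halt
    rw [altStep, PySem.List.pyGetD_map_pyRange_of_nonneg _ _ _ _ ha0 (by omega)]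

    rw [hw a ha0 (by omega), hw (a + (L+2) - 1) (by omega) (by omega)]
    rw [hcur (a+2) (by omega) (by omega), hcur (a+1) (by omega) (by omega),
        hcur a ha0 (by omega)]
    rw [show i + (a+2) + L - 1 = i + a + (L+2) - 1 from by ring,
        show i + (a+1) + L - 1 = i + a + (L+2) - 1 - 1 from by ring,
        show i + a + L - 1 = i + a + (L+2) - 1 - 2 from by ring,
        show i + (a + (L+2) - 1) = i + a + (L+2) - 1 from by ring,
        show i + (a+2) = i + a + 2 from by ring,
        show i + (a+1) = i + a + 1 from by ring]
    rw [coins_rec_recur v (show i + a ≤ i + a + (L+2) - 1 by omega),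
        min_add_add_left, min_add_add_left]

theorem altRun_eval (v w : List Int) (i : Int)
    (hw : ∀ a : Int, 0 ≤ a → a < (w.length : Int) →
      PySem.List.pyGetD w a 0 = PySem.List.pyGetD v (i + a) 0) :
    altRun w = coins_rec i (i + (w.length : Int) - 1) v := by
  unfold altRun
  by_cases hpar : w.length % 2 = 1
  · rw [if_pos hpar]
    apply altLoop_eval v w i hw ((w.length - 1) / 2) 1 w (by omega) (by omega) (by omega)
    intro a ha0 halen
    rw [hw a ha0 halen, show i + a + (1:Int) - 1 = i + a from by ring, coins_rec_self]
  · rw [if_neg hpar]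
    apply altLoop_eval v w i hw (w.length / 2) 0 _ (by omega) (by omega) (by simp)
    intro a ha0 _
    rw [pyGetD_replicate_zero,
        coins_rec_of_gt v (show i + a > i + a + 0 - 1 by omega)]

-- ===== VERDICT (by name: the statement is the Claim_ definition above) =====
theorem coins_rec_spec : Claim_equal_coins_rec := by
  intro i j v _ _
  simp only [Spec_coins_rec]
  by_cases hij : i > j
  · rw [coins_rec_of_gt v hij, coins_rec_alt, if_pos hij]
  · have hij' : i ≤ j := by omega
    rw [coins_rec_alt, if_neg hij]
    set w : List Int := (PySem.List.pyRange i (j+1) 1).map (fun k => PySem.List.pyGetD v k 0) with hwdef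
    have hlen : (w.length : Int) = j + 1 - i := by
      simp [hwdef, PySem.List.length_pyRange_one]
      omega
    have hw : ∀ a : Int, 0 ≤ a → a < (w.length : Int) →
        PySem.List.pyGetD w a 0 = PySem.List.pyGetD v (i + a) 0 := by
      intro a ha0 halen
      obtain ⟨k, rfl⟩ : ∃ k : Nat, a = (k : Int) := ⟨a.toNat, by omega⟩
      rw [hwdef, PySem.List.pyGetD_map_pyRange_one _ _ _ _ _ (by omega)]
    rw [altRun_eval v w i hw, show i + (w.length : Int) - 1 = j from by omega]
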